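-- pv_equiv track=rewrite | github.com/is2-digital/is2-content-automation | ica/pipeline/email_subject.py | format_review_slack_message
-- ===== SOURCE A (Python) =====
-- def build_review_slack_blocks(review_text: str) -> list[dict[str, object]]:
--     """Build Slack Block Kit blocks for displaying the email review.
--
--     Ports the n8n "Format output - Review" Code node.
--
--     Args:
--         review_text: The generated review text from the LLM.
--
--     Returns:
--         Slack Block Kit blocks list.
--     """
--     return [
--         {"type": "divider"},
--         {
--             "type": "section",
--             "text": {
--                 "type": "mrkdwn",
--                 "text": "\n\n\n Review: \n",
--             },
--         },
--         {"type": "divider"},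
--         {
--             "type": "section",
--             "text": {
--                 "type": "mrkdwn",
--                 "text": f"\n{review_text}\n",
--             },
--         },
--     ]
--
-- def format_review_slack_message(review_text: str) -> str:
--     """Build a flattened Slack message from review blocks.
--
--     Ports the message construction in n8n "Format output - Review" Code node.
--
--     Args:
--         review_text: The generated review text.
--
--     Returns:
--         Flattened Slack mrkdwn message string.
--     """
--     blocks = build_review_slack_blocks(review_text)
--     separator = "\n\u2500\u2500\u2500\u2500\u2500\u2500\u2500\u2500\u2500\u2500\u2500\u2500\u2500\u2500\u2500\u2500\u2500\u2500\u2500\u2500\u2500\u2500\u2500\u2500\u2500\u2500\u2500\u2500\u2500\u2500\n\n"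
--     parts = [
--         b["text"]["text"]  # type: ignore[index]
--         for b in blocks
--         if "text" in b and isinstance(b["text"], dict) and "text" in b["text"]
--     ]
--     return separator.join(parts)
-- ===== SOURCE B (Python) =====
-- def format_review_slack_message(review_text: str) -> str:
--     """Closed-form construction: inline the two section texts and the separator."""
--     sep = "\n" + "\u2500" * 30 + "\n\n"
--     return f"\n\n\n Review: \n{sep}\n{review_text}\n"
-- ===== Notes on version B (the rewrite author's own statement) =====
-- stated objective: simpler
-- what changed: B drops the block-list builder and the filtering comprehension entirely and returns one closed-form f-string: header, separator, then the wrapped review text.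
import Mathlib
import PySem

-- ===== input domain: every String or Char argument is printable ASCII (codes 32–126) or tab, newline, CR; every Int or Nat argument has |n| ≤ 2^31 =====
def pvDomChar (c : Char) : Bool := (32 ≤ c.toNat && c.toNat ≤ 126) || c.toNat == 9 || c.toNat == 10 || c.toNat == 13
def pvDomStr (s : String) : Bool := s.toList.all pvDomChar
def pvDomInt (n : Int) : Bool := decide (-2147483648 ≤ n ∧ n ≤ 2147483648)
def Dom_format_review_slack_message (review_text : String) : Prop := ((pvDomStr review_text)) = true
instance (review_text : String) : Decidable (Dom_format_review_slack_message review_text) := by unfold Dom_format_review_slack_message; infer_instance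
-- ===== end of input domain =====

-- B replaces A's block-list construction + filtering comprehension + join by a single
-- closed-form string concatenation (objective: simpler).

-- ===== PORT A =====

-- dict[str, object] values here are either a string or a nested str->str dict
inductive PyVal
  | str : String → PyVal
  | dict : PySem.Dict String String → PyVal
deriving Repr, DecidableEq

def build_review_slack_blocks (review_text : String) : List (PySem.Dict String PyVal) :=
  [ PySem.Dict.ofList [("type", PyVal.str "divider")],
    PySem.Dict.ofList [("type", PyVal.str "section"),
      ("text", PyVal.dict (PySem.Dict.ofList [("type", "mrkdwn"), ("text", "\n\n\n Review: \n")]))],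
    PySem.Dict.ofList [("type", PyVal.str "divider")],
    PySem.Dict.ofList [("type", PyVal.str "section"),
      ("text", PyVal.dict (PySem.Dict.ofList [("type", "mrkdwn"), ("text", "\n" ++ review_text ++ "\n")]))] ]

def format_review_slack_message (review_text : String) : String :=
  let blocks := build_review_slack_blocks review_text
  let separator := "\n──────────────────────────────\n\n"
  -- the comprehension: keep blocks with a dict "text" field containing a "text" key
  let parts := blocks.filterMap (fun b =>
    match b.get? "text" with
    | some (PyVal.dict d) => d.get? "text"
    | _ => none)
  PySem.Str.join separator parts

-- ===== PORT B =====
def format_review_slack_message_alt (review_text : String) : String :=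
  let sep := "\n" ++ String.ofList (List.replicate 30 '─') ++ "\n\n"
  "\n\n\n Review: \n" ++ sep ++ "\n" ++ review_text ++ "\n"

-- ===== PRECONDITION & SPEC =====
def Spec_format_review_slack_message (review_text : String) (out : String) : Prop := out = format_review_slack_message_alt review_text
instance (review_text : String) (out : String) : Decidable (Spec_format_review_slack_message review_text out) := by unfold Spec_format_review_slack_message; infer_instance

-- ===== CLAIM (what is proved, stated in full; the proofs are below) =====
def Claim_equal_format_review_slack_message : Prop := ∀ (review_text : String), Dom_format_review_slack_message review_text → Spec_format_review_slack_message review_text (format_review_slack_message review_text)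

-- ===== LEMMAS AND PROOFS =====

-- ===== VERDICT (by name: the statement is the Claim_ definition above) =====
theorem format_review_slack_message_spec : Claim_equal_format_review_slack_message := by
  intro rt _
  show _ = _
  have h : String.toList (format_review_slack_message rt)
         = String.toList (format_review_slack_message_alt rt) := by
    simp [format_review_slack_message, format_review_slack_message_alt,
          build_review_slack_blocks, List.filterMap,
          PySem.Str.join, PySem.Chars.join, List.intercalate,
          PySem.Dict.ofList, PySem.Dict.update, PySem.Dict.insert,
          PySem.Dict.get?, PySem.Dict.contains, List.intersperse, PySem.Dict.empty, List.find?]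
  calc format_review_slack_message rt
      = String.ofList (String.toList (format_review_slack_message rt)) := by
        simp
    _ = String.ofList (String.toList (format_review_slack_message_alt rt)) := by rw [h]
    _ = format_review_slack_message_alt rt := by simp
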